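-- pv_equiv track=rewrite | github.com/ShaanBarkat/CSC-241-Comp-Sci-I | hw4.py | numLen
-- ===== SOURCE A (Python) =====
-- def numLen(s, target):
--     listlength = s.split()
--     lator = 0
--     for wordlength in listlength:
--         wordlength1 = len(wordlength)
--         if wordlength1 == target:
--             lator += 1
--     return lator
-- ===== SOURCE B (Python) =====
-- def numLen(s, target):
--     hist = {}
--     for w in s.split():
--         hist[len(w)] = hist.get(len(w), 0) + 1
--     return hist.get(target, 0)
-- ===== Notes on version B (the rewrite author's own statement) =====
-- stated objective: idiomatic
-- what changed: B builds a histogram of word lengths (dict keyed by len) in one pass and returns a single lookup with default 0, instead of A's running accumulator with a per-word equality branch.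
import Mathlib
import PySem

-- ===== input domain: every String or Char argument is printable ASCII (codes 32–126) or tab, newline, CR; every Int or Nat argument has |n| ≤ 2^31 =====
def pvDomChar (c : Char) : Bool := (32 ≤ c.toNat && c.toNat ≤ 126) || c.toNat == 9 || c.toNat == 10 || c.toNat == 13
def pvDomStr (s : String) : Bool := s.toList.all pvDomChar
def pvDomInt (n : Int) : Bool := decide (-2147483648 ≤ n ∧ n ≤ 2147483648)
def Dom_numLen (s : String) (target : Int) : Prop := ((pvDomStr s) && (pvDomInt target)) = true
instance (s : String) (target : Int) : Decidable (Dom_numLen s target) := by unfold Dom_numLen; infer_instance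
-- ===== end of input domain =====

-- B replaces A's accumulator-with-branch by a one-pass word-length histogram plus a single lookup (idiomatic; return value only).

-- ===== PORT A =====
def numLen (s : String) (target : Int) : Int :=
  let listlength := PySem.Str.split₀ s
  listlength.foldl (fun lator wordlength =>
    let wordlength1 := PySem.Str.len wordlength
    if wordlength1 == target then lator + 1 else lator) 0

-- ===== PORT B =====
def numLen_alt (s : String) (target : Int) : Int :=
  let hist : PySem.Dict Int Int :=
    (PySem.Str.split₀ s).foldl (fun d w => d.insert (PySem.Str.len w) (d.getD (PySem.Str.len w) 0 + 1)) PySem.Dict.empty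
  hist.getD target 0

-- ===== PRECONDITION & SPEC =====
def Spec_numLen (s : String) (target : Int) (out : Int) : Prop := out = numLen_alt s target
instance (s : String) (target : Int) (out : Int) : Decidable (Spec_numLen s target out) := by unfold Spec_numLen; infer_instance

-- ===== CLAIM (what is proved, stated in full; the proofs are below) =====
def Claim_equal_numLen : Prop := ∀ (s : String) (target : Int), Dom_numLen s target → Spec_numLen s target (numLen s target)

-- ===== LEMMAS AND PROOFS =====
theorem numLen_foldl_count (ws : List String) (target acc : Int) :
    ws.foldl (fun lator w => if PySem.Str.len w == target then lator + 1 else lator) acc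
      = acc + ((ws.map PySem.Str.len).count target : Int) := by
  induction ws generalizing acc with
  | nil => simp
  | cons w ws ih =>
    simp only [List.foldl_cons, List.map_cons, ih, List.count_cons]
    by_cases h : (PySem.Str.len w == target) = true
    · simp only [h, if_true]
      push_cast
      ring
    · simp only [h]
      push_cast
      ring

theorem numLen_hist_count (ws : List String) (target : Int) :
    (ws.foldl (fun d w => d.insert (PySem.Str.len w) (d.getD (PySem.Str.len w) 0 + 1))
        (PySem.Dict.empty : PySem.Dict Int Int)).getD target 0
      = ((ws.map PySem.Str.len).count target : Int) := by
  have h := PySem.Dict.getD_foldl_insert_add_one (l := ws.map PySem.Str.len)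
      (d := (PySem.Dict.empty : PySem.Dict Int Int)) (v := target)
  rw [List.foldl_map] at h
  simpa using h

-- ===== VERDICT (by name: the statement is the Claim_ definition above) =====
theorem numLen_spec : Claim_equal_numLen := by
  intro s target _
  unfold Spec_numLen numLen numLen_alt
  rw [numLen_foldl_count, numLen_hist_count]
  ring
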